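-- pv_equiv track=rewrite | github.com/gustavomhss/HumanGR | pipeline/agents/crewai_coordination.py | _delegate_by_capability
-- ===== SOURCE A (Python) =====
-- from typing import Any, Dict, List, Optional, TypedDict
--
-- class AgentCapabilities(TypedDict):
--     """Capabilities of an agent."""
--     role: str
--     skills: List[str]
--     tools: List[str]
--     max_concurrent_tasks: int
--     specializations: List[str]
--
-- class TaskDefinition(TypedDict):
--     """Definition of a task to delegate."""
--     task_id: str
--     description: str
--     priority: str
--     required_role: Optional[str]
--     required_capabilities: List[str]
--     dependencies: List[str]
--     context: Dict[str, Any]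
--     timeout_seconds: float
--     created_at: str
--
-- def _delegate_by_capability(
--
--     task: TaskDefinition,
--     available_agents: Dict[str, AgentCapabilities],
-- ) -> tuple[Optional[str], str]:
--     """Delegate based on capabilities match."""
--     required_caps = set(task.get("required_capabilities", []))
--
--     best_match = None
--     best_score = 0
--
--     for agent_id, caps in available_agents.items():
--         agent_caps = set(caps["skills"] + caps.get("specializations", []))
--         match_score = len(required_caps & agent_caps)
--
--         if match_score > best_score:
--             best_score = match_score
--             best_match = agent_id
--
--     if best_match:
--         return best_match, f"Capability match score: {best_score}"
--
--     return None, "No capability match"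
-- ===== SOURCE B (Python) =====
-- def _delegate_by_capability(task, available_agents):
--     """Delegate based on capabilities match (inverted-index vote count)."""
--     # one pass over agents: capability -> list of agent ids owning it
--     index = {}
--     for agent_id, caps in available_agents.items():
--         for cap in set(caps["skills"] + caps.get("specializations", [])):
--             index.setdefault(cap, []).append(agent_id)
--
--     # one pass over the required capabilities: tally votes per agent
--     counts = {}
--     for cap in set(task.get("required_capabilities", [])):
--         for agent_id in index.get(cap, []):
--             counts[agent_id] = counts.get(agent_id, 0) + 1
--
--     best_match = None
--     best_score = 0
--     for agent_id in available_agents: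
--         score = counts.get(agent_id, 0)
--         if score > best_score:
--             best_match = agent_id
--             best_score = score
--
--     if best_match:
--         return best_match, f"Capability match score: {best_score}"
--     return None, "No capability match"
-- ===== Notes on version B (the rewrite author's own statement) =====
-- stated objective: alternative
-- what changed: A scores each agent by building its capability set and intersecting it with the required set; B instead builds an inverted index from capability to agent ids in one pass, tallies one vote per required capability via the index's posting lists, and then picks the first strictly-better agent in insertion order.
import Mathlib
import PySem

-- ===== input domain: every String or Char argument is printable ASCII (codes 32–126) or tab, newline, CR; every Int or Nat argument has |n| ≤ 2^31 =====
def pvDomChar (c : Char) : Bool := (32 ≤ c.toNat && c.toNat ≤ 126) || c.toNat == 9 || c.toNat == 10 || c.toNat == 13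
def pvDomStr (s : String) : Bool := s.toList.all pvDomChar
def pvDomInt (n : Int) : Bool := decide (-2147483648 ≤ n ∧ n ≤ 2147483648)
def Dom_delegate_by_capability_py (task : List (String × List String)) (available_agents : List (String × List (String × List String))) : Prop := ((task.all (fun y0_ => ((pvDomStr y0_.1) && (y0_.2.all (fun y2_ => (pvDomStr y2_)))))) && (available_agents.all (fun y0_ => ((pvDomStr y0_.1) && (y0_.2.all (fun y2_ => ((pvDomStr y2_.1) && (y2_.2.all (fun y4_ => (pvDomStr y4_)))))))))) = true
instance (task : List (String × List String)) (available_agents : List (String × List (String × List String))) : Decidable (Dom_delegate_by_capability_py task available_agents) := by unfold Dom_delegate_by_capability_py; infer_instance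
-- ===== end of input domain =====

-- B replaces A's per-agent set-intersection scoring by an inverted capability→agents index plus a vote-count pass (alternative decomposition; return value proved equal under Pre_).


-- ===== PORT A =====
def delegate_by_capability_py (task : List (String × List String)) (available_agents : List (String × List (String × List String))) : Option String × String :=
  let required_caps : PySem.Set String :=
    PySem.Set.ofList ((PySem.Dict.mk task).getD "required_capabilities" [])
  let r := available_agents.foldl
    (fun (st : Option String × Int) p =>
      let caps := PySem.Dict.mk p.2
      let agent_caps : PySem.Set String :=
        PySem.Set.ofList (caps.getD "skills" [] ++ caps.getD "specializations" [])
      let match_score : Int := ((PySem.Set.inter required_caps agent_caps).length : Int)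
      if match_score > st.2 then (some p.1, match_score) else st)
    (none, 0)
  match r.1 with
  | some best_match =>
      if best_match ≠ "" then
        (some best_match, "Capability match score: " ++ PySem.Int.toStr r.2)
      else (none, "No capability match")
  | none => (none, "No capability match")

-- ===== PORT B =====
def delegate_by_capability_py_alt (task : List (String × List String)) (available_agents : List (String × List (String × List String))) : Option String × String :=
  let index : PySem.Dict String (List String) :=
    available_agents.foldl
      (fun idx p =>
        (PySem.Set.ofList ((PySem.Dict.mk p.2).getD "skills" [] ++
            (PySem.Dict.mk p.2).getD "specializations" [])).foldl
          (fun idx cap => idx.modify cap [] (fun l => l ++ [p.1])) idx)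
      PySem.Dict.empty
  let counts : PySem.Dict String Int :=
    (PySem.Set.ofList ((PySem.Dict.mk task).getD "required_capabilities" [])).foldl
      (fun cnt cap => (index.getD cap []).foldl
        (fun cnt aid => cnt.modify aid 0 (fun v => v + 1)) cnt)
      PySem.Dict.empty
  let r := available_agents.foldl
    (fun (st : Option String × Int) p =>
      let score := counts.getD p.1 0
      if score > st.2 then (some p.1, score) else st)
    (none, 0)
  match r.1 with
  | some best_match =>
      if best_match ≠ "" then
        (some best_match, "Capability match score: " ++ PySem.Int.toStr r.2)
      else (none, "No capability match")
  | none => (none, "No capability match")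

-- ===== PRECONDITION & SPEC =====
-- Pre_ excludes (a) agents whose capability dict lacks the "skills" key — there Python A raises KeyError —
-- and (b) association lists with a repeated agent id, which correspond to no Python input (a dict cannot
-- carry duplicate keys).
def Pre_delegate_by_capability_py (_task : List (String × List String)) (available_agents : List (String × List (String × List String))) : Prop :=
  (∀ p ∈ available_agents, "skills" ∈ p.2.map Prod.fst) ∧ (available_agents.map Prod.fst).Nodup
instance (task : List (String × List String)) (available_agents : List (String × List (String × List String))) : Decidable (Pre_delegate_by_capability_py task available_agents) := by unfold Pre_delegate_by_capability_py; infer_instance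

def pvWitness_delegate_by_capability_py : (List (String × List String)) × (List (String × List (String × List String))) :=
  ([("required_capabilities", ["a", "b"])],
   [("agent1", [("skills", ["a"]), ("specializations", ["b"])]),
    ("agent2", [("skills", ["c"])])])

def Spec_delegate_by_capability_py (task : List (String × List String)) (available_agents : List (String × List (String × List String))) (out : Option String × String) : Prop := out = delegate_by_capability_py_alt task available_agents
instance (task : List (String × List String)) (available_agents : List (String × List (String × List String))) (out : Option String × String) : Decidable (Spec_delegate_by_capability_py task available_agents out) := by unfold Spec_delegate_by_capability_py; infer_instance

-- ===== CLAIM (what is proved, stated in full; the proofs are below) =====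
def Claim_equal_delegate_by_capability_py : Prop := ∀ (task : List (String × List String)) (available_agents : List (String × List (String × List String))), Dom_delegate_by_capability_py task available_agents → Pre_delegate_by_capability_py task available_agents → Spec_delegate_by_capability_py task available_agents (delegate_by_capability_py task available_agents)

-- ===== LEMMAS AND PROOFS =====

-- combined capability set of one agent entry (proof-side name for the expression both ports build)
def pvCapset (p : String × List (String × List String)) : PySem.Set String :=
  PySem.Set.ofList ((PySem.Dict.mk p.2).getD "skills" [] ++ (PySem.Dict.mk p.2).getD "specializations" [])

-- filtering a duplicate-free list for one value
theorem pv_filter_beq_nodup {l : List String} {c : String} (h : l.Nodup) :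
    l.filter (fun x => x == c) = if c ∈ l then [c] else [] := by
  induction l with
  | nil => simp
  | cons x xs ih =>
    rcases List.nodup_cons.mp h with ⟨hx, hnd⟩
    by_cases hxc : x = c
    · subst hxc
      simp [hx, ih hnd]
    · simp [hxc, Ne.symm hxc, ih hnd]

-- one agent's contribution to the inverted index
theorem pv_index_step (p : String × List (String × List String))
    (idx : PySem.Dict String (List String)) (c : String) :
    ((pvCapset p).foldl (fun idx cap => idx.modify cap [] (fun l => l ++ [p.1])) idx).getD c []
      = idx.getD c [] ++ (if c ∈ pvCapset p then [p.1] else []) := by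
  have hmap : (pvCapset p).foldl (fun idx cap => idx.modify cap [] (fun l => l ++ [p.1])) idx
      = ((pvCapset p).map (fun cap => (cap, p.1))).foldl
          (fun d q => d.modify q.1 [] (fun l => l ++ [q.2])) idx := by
    rw [List.foldl_map]
  rw [hmap, PySem.Dict.getD_foldl_modify_append]
  have hfm : ((pvCapset p).map (fun cap => (cap, p.1))).filter (fun q => q.1 == c)
      = ((pvCapset p).filter (fun x => x == c)).map (fun cap => (cap, p.1)) := by
    rw [List.filter_map]; rfl
  have hcnd : (pvCapset p).Nodup := PySem.Set.nodup_ofList _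
  rw [hfm, pv_filter_beq_nodup hcnd]
  by_cases hc : c ∈ pvCapset p <;> simp [hc]

-- the posting list of capability c in the full inverted index
theorem pv_index_getD (agents : List (String × List (String × List String)))
    (idx : PySem.Dict String (List String)) (c : String) :
    (agents.foldl
        (fun idx p =>
          (PySem.Set.ofList ((PySem.Dict.mk p.2).getD "skills" [] ++
              (PySem.Dict.mk p.2).getD "specializations" [])).foldl
            (fun idx cap => idx.modify cap [] (fun l => l ++ [p.1])) idx)
        idx).getD c []
      = idx.getD c [] ++
        (agents.filter (fun p => decide (c ∈ pvCapset p))).map Prod.fst := by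
  induction agents generalizing idx with
  | nil => simp
  | cons p ps ih =>
    simp only [List.foldl_cons]
    rw [ih]
    rw [show (PySem.Set.ofList ((PySem.Dict.mk p.2).getD "skills" [] ++
        (PySem.Dict.mk p.2).getD "specializations" [])) = pvCapset p from rfl]
    rw [pv_index_step]
    by_cases hc : c ∈ pvCapset p <;>
      simp [hc, List.append_assoc]

-- in a duplicate-free agent list, agent p0's id occurs in posting list c iff p0 has capability c
theorem pv_posting_count (agents : List (String × List (String × List String)))
    (hnd : (agents.map Prod.fst).Nodup)
    (p0 : String × List (String × List String)) (hp0 : p0 ∈ agents) (c : String) :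
    ((agents.filter (fun p => decide (c ∈ pvCapset p))).map Prod.fst).count p0.1
      = if c ∈ pvCapset p0 then 1 else 0 := by
  induction agents with
  | nil => cases hp0
  | cons p ps ih =>
    simp only [List.map_cons, List.nodup_cons] at hnd
    rcases hnd with ⟨hpx, hnd⟩
    rcases List.mem_cons.mp hp0 with h0 | h0
    · subst h0
      have hnot : p0.1 ∉ (ps.filter (fun p => decide (c ∈ pvCapset p))).map Prod.fst := by
        intro hmem
        exact hpx (by
          rcases List.mem_map.mp hmem with ⟨q, hq, hq1⟩
          exact List.mem_map.mpr ⟨q, List.mem_of_mem_filter hq, hq1⟩)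
      by_cases hc : c ∈ pvCapset p0 <;>
        simp [hc, List.count_eq_zero.mpr hnot]
    · have hne : p0.1 ≠ p.1 := by
        intro he; exact hpx (he ▸ List.mem_map.mpr ⟨p0, h0, rfl⟩)
      by_cases hc : c ∈ pvCapset p <;>
        simp [hc, Ne.symm hne, ih hnd h0]

-- the tallying pass sums, over the required capabilities, the occurrences in each posting list
theorem pv_counts_getD (idx : PySem.Dict String (List String))
    (req : List String) (cnt : PySem.Dict String Int) (a : String) :
    (req.foldl
        (fun cnt cap => (idx.getD cap []).foldl
          (fun cnt aid => cnt.modify aid 0 (fun v => v + 1)) cnt)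
        cnt).getD a 0
      = cnt.getD a 0 + ((req.map (fun cap => (((idx.getD cap []).count a : Nat) : Int))).sum) := by
  induction req generalizing cnt with
  | nil => simp
  | cons c cs ih =>
    simp only [List.foldl_cons, List.map_cons, List.sum_cons]
    rw [ih, PySem.Dict.getD_foldl_modify_add_one]
    ring

-- a 0/1 indicator sum over req is the length of the matching sublist
theorem pv_sum_indicator (req : List String) (s : PySem.Set String) :
    ((req.map (fun cap => if cap ∈ s then (1 : Int) else 0)).sum)
      = ((req.filter (fun cap => decide (cap ∈ s))).length : Int) := by
  induction req with
  | nil => simp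
  | cons c cs ih =>
    by_cases hc : c ∈ s
    · simp [hc, ih]; omega
    · simp [hc, ih]

-- core: B's vote count for an agent equals A's intersection score
theorem pv_score_eq (task : List (String × List String))
    (agents : List (String × List (String × List String)))
    (hnd : (agents.map Prod.fst).Nodup)
    (p0 : String × List (String × List String)) (hp0 : p0 ∈ agents) :
    ((PySem.Set.ofList ((PySem.Dict.mk task).getD "required_capabilities" [])).foldl
        (fun cnt cap => ((agents.foldl
            (fun idx p =>
              (PySem.Set.ofList ((PySem.Dict.mk p.2).getD "skills" [] ++
                  (PySem.Dict.mk p.2).getD "specializations" [])).foldl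
                (fun idx cap => idx.modify cap [] (fun l => l ++ [p.1])) idx)
            PySem.Dict.empty).getD cap []).foldl
          (fun cnt aid => cnt.modify aid 0 (fun v => v + 1)) cnt)
        PySem.Dict.empty).getD p0.1 0
      = ((PySem.Set.inter
            (PySem.Set.ofList ((PySem.Dict.mk task).getD "required_capabilities" []))
            (pvCapset p0)).length : Int) := by
  rw [pv_counts_getD]
  have hpost : ∀ cap : String,
      (((agents.foldl
          (fun idx p =>
            (PySem.Set.ofList ((PySem.Dict.mk p.2).getD "skills" [] ++
                (PySem.Dict.mk p.2).getD "specializations" [])).foldl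
              (fun idx cap => idx.modify cap [] (fun l => l ++ [p.1])) idx)
          PySem.Dict.empty).getD cap []).count p0.1 : Nat)
      = if cap ∈ pvCapset p0 then 1 else 0 := by
    intro cap
    rw [pv_index_getD, PySem.Dict.getD_empty, List.nil_append]
    exact pv_posting_count agents hnd p0 hp0 cap
  have hmapeq :
      ((PySem.Set.ofList ((PySem.Dict.mk task).getD "required_capabilities" [])).map
        (fun cap => (((agents.foldl
            (fun idx p =>
              (PySem.Set.ofList ((PySem.Dict.mk p.2).getD "skills" [] ++
                  (PySem.Dict.mk p.2).getD "specializations" [])).foldl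
                (fun idx cap => idx.modify cap [] (fun l => l ++ [p.1])) idx)
            PySem.Dict.empty).getD cap []).count p0.1 : Int)))
      = ((PySem.Set.ofList ((PySem.Dict.mk task).getD "required_capabilities" [])).map
          (fun cap => if cap ∈ pvCapset p0 then (1 : Int) else 0)) := by
    apply List.map_congr_left
    intro cap _
    rw [hpost cap]
    by_cases hc : cap ∈ pvCapset p0 <;> simp [hc]
  rw [hmapeq, pv_sum_indicator, PySem.Dict.getD_empty]
  simp [PySem.Set.inter]

-- ===== VERDICT (by name: the statement is the Claim_ definition above) =====
theorem delegate_by_capability_py_spec : Claim_equal_delegate_by_capability_py := by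
  intro task available_agents _hdom hpre
  rcases hpre with ⟨_hsk, hnd⟩
  unfold Spec_delegate_by_capability_py delegate_by_capability_py delegate_by_capability_py_alt
  have hfold := PySem.List.foldl_congr_mem available_agents
    (fun (st : Option String × Int) p =>
      let caps := PySem.Dict.mk p.2
      let agent_caps : PySem.Set String :=
        PySem.Set.ofList (caps.getD "skills" [] ++ caps.getD "specializations" [])
      let match_score : Int :=
        ((PySem.Set.inter
            (PySem.Set.ofList ((PySem.Dict.mk task).getD "required_capabilities" []))
            agent_caps).length : Int)
      if match_score > st.2 then (some p.1, match_score) else st)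
    (fun (st : Option String × Int) p =>
      let score :=
        ((PySem.Set.ofList ((PySem.Dict.mk task).getD "required_capabilities" [])).foldl
          (fun cnt cap => ((available_agents.foldl
              (fun idx p =>
                (PySem.Set.ofList ((PySem.Dict.mk p.2).getD "skills" [] ++
                    (PySem.Dict.mk p.2).getD "specializations" [])).foldl
                  (fun idx cap => idx.modify cap [] (fun l => l ++ [p.1])) idx)
              PySem.Dict.empty).getD cap []).foldl
            (fun cnt aid => cnt.modify aid 0 (fun v => v + 1)) cnt)
          PySem.Dict.empty).getD p.1 0
      if score > st.2 then (some p.1, score) else st)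
    (none, 0)
    (by
      intro acc p hp
      simp only
      rw [pv_score_eq task available_agents hnd p hp]
      rfl)
  dsimp only
  rw [hfold]
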